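-- pv_equiv track=rewrite | github.com/theabbie/leetcode | subarray-with-elements-greater-than-varying-threshold.py | validSubarraySize
-- ===== SOURCE A (Python) =====
-- from typing import List
--
-- def validSubarraySize(nums: List[int], threshold: int) -> int:
--     n = len(nums)
--     s = []
--     left = [-1] * (n + 1)
--     right = [n] * (n + 1)
--     for i in range(n):
--         while (len(s) != 0 and
--                nums[s[-1]] >= nums[i]):
--             s.pop()
--         if len(s) != 0:
--             left[i] = s[-1]
--         s.append(i)
--     s = []
--     for i in range(n - 1, -1, -1):
--         while (len(s) != 0 and nums[s[-1]] >= nums[i]):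
--             s.pop()
--         if len(s) != 0:
--             right[i] = s[-1]
--         s.append(i)
--     for i in range(n):
--         l = right[i] - left[i] - 1
--         if l * nums[i] > threshold:
--             return l
--     return -1
-- ===== SOURCE B (Python) =====
-- from typing import List
--
-- def validSubarraySize(nums: List[int], threshold: int) -> int:
--     # For each index in order, scan outwards for the nearest strictly smaller
--     # neighbours; the gap is the maximal run of elements >= nums[i].
--     n = len(nums)
--     for i in range(n):
--         lo = i - 1
--         while lo >= 0 and nums[lo] >= nums[i]:
--             lo -= 1
--         hi = i + 1
--         while hi < n and nums[hi] >= nums[i]: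
--             hi += 1
--         l = hi - lo - 1
--         if l * nums[i] > threshold:
--             return l
--     return -1
-- ===== Notes on version B (the rewrite author's own statement) =====
-- stated objective: simpler
-- what changed: Replaces the two monotonic-stack passes and the left/right boundary arrays with a single early-returning loop that, for each index, scans outwards for the nearest strictly smaller neighbours.
import Mathlib
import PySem

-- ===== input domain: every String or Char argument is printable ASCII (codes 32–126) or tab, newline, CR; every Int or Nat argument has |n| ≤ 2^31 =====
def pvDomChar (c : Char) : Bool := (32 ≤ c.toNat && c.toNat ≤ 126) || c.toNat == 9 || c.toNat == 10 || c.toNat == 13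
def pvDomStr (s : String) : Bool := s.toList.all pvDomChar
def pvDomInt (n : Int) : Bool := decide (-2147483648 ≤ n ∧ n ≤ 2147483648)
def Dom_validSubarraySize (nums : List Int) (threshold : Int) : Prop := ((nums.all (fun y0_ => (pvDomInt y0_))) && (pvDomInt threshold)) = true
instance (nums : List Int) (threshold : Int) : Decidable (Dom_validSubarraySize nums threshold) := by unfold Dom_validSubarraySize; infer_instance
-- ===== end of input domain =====

-- B replaces A's two monotonic-stack passes (simpler, not faster): for each index it
-- scans outwards for the nearest strictly smaller neighbours and returns early.

-- ===== PORT A =====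
-- The Python stack s (top = s[-1]) is represented with its TOP AT THE HEAD of the list.
-- inner 'while len(s) != 0 and nums[s[-1]] >= nums[i]: s.pop()'
def popWhileA (nums : List Int) (v : Int) : List Int → List Int
  | [] => []
  | t :: rest => if PySem.List.pyGetD nums t 0 ≥ v then popWhileA nums v rest else t :: rest

-- one iteration of the first for-loop: state = (stack, left array)
def stepLeftA (nums : List Int) (st : List Int × List Int) (i : Int) : List Int × List Int :=
  let s := popWhileA nums (PySem.List.pyGetD nums i 0) st.1
  let left := match s with
    | [] => st.2
    | t :: _ => PySem.List.pySetD st.2 i t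
  (i :: s, left)

-- one iteration of the second for-loop: state = (stack, right array)
def stepRightA (nums : List Int) (st : List Int × List Int) (i : Int) : List Int × List Int :=
  let s := popWhileA nums (PySem.List.pyGetD nums i 0) st.1
  let right := match s with
    | [] => st.2
    | t :: _ => PySem.List.pySetD st.2 i t
  (i :: s, right)

-- third loop with early return
def scanA (nums left right : List Int) (threshold : Int) : List Int → Int
  | [] => -1
  | i :: rest =>
      let l := PySem.List.pyGetD right i 0 - PySem.List.pyGetD left i 0 - 1
      if l * PySem.List.pyGetD nums i 0 > threshold then l
      else scanA nums left right threshold rest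

def validSubarraySize (nums : List Int) (threshold : Int) : Int :=
  let n : Int := nums.length
  let left0 := List.replicate (n + 1).toNat (-1 : Int)
  let right0 := List.replicate (n + 1).toNat n
  let resL := (PySem.List.pyRange 0 n 1).foldl (stepLeftA nums) ([], left0)
  let resR := (PySem.List.pyRange (n - 1) (-1) (-1)).foldl (stepRightA nums) ([], right0)
  scanA nums resL.2 resR.2 threshold (PySem.List.pyRange 0 n 1)

-- ===== PORT B =====
-- 'while lo >= 0 and nums[lo] >= v: lo -= 1'
def loLoop (nums : List Int) (v : Int) (j : Int) : Int :=
  if h : 0 ≤ j ∧ PySem.List.pyGetD nums j 0 ≥ v then loLoop nums v (j - 1) else j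
termination_by (j + 1).toNat
decreasing_by omega

-- 'while hi < n and nums[hi] >= v: hi += 1'
def hiLoop (nums : List Int) (v : Int) (j : Int) : Int :=
  if h : j < (nums.length : Int) ∧ PySem.List.pyGetD nums j 0 ≥ v then hiLoop nums v (j + 1) else j
termination_by ((nums.length : Int) - j).toNat
decreasing_by omega

-- the loop 'for i in range(n)' with early return
def scanB (nums : List Int) (threshold : Int) : List Int → Int
  | [] => -1
  | i :: rest =>
      let v := PySem.List.pyGetD nums i 0
      let lo := loLoop nums v (i - 1)
      let hi := hiLoop nums v (i + 1)
      let l := hi - lo - 1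
      if l * v > threshold then l else scanB nums threshold rest

def validSubarraySize_alt (nums : List Int) (threshold : Int) : Int :=
  scanB nums threshold (PySem.List.pyRange 0 (nums.length : Int) 1)

-- ===== PRECONDITION & SPEC =====
def Spec_validSubarraySize (nums : List Int) (threshold : Int) (out : Int) : Prop := out = validSubarraySize_alt nums threshold
instance (nums : List Int) (threshold : Int) (out : Int) : Decidable (Spec_validSubarraySize nums threshold out) := by unfold Spec_validSubarraySize; infer_instance

-- ===== CLAIM (what is proved, stated in full; the proofs are below) =====
def Claim_equal_validSubarraySize : Prop := ∀ (nums : List Int) (threshold : Int), Dom_validSubarraySize nums threshold → Spec_validSubarraySize nums threshold (validSubarraySize nums threshold)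

-- ===== LEMMAS AND PROOFS =====

-- stack invariant of A's first pass: the stack is chain-linked by loLoop
inductive ChainL (nums : List Int) : Int → List Int → Prop where
  | nil : ChainL nums (-1) []
  | cons {t : Int} {rest : List Int} (h0 : 0 ≤ t) (h1 : t < (nums.length : Int))
      (hc : ChainL nums (loLoop nums (PySem.List.pyGetD nums t 0) (t - 1)) rest) :
      ChainL nums t (t :: rest)

-- stack invariant of A's second pass: chain-linked by hiLoop
inductive ChainR (nums : List Int) : Int → List Int → Prop where
  | nil : ChainR nums (nums.length : Int) []
  | cons {t : Int} {rest : List Int} (h0 : 0 ≤ t) (h1 : t < (nums.length : Int))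
      (hc : ChainR nums (hiLoop nums (PySem.List.pyGetD nums t 0) (t + 1)) rest) :
      ChainR nums t (t :: rest)

-- ----- basic facts about loLoop / hiLoop -----

theorem loLoop_eq_self {nums : List Int} {v j : Int}
    (h : ¬ (0 ≤ j ∧ PySem.List.pyGetD nums j 0 ≥ v)) : loLoop nums v j = j := by
  rw [loLoop]; simp [h]

theorem loLoop_step {nums : List Int} {v j : Int}
    (h0 : 0 ≤ j) (h1 : PySem.List.pyGetD nums j 0 ≥ v) :
    loLoop nums v j = loLoop nums v (j - 1) := by
  rw [loLoop]; simp [h0, h1]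

theorem loLoop_le (nums : List Int) (v j : Int) : loLoop nums v j ≤ j := by
  induction hn : (j + 1).toNat using Nat.strong_induction_on generalizing j with
  | _ n ih =>
    by_cases h : 0 ≤ j ∧ PySem.List.pyGetD nums j 0 ≥ v
    · rw [loLoop_step h.1 h.2]
      have := ih (j - 1 + 1).toNat (by omega) (j - 1) rfl
      omega
    · rw [loLoop_eq_self h]

theorem loLoop_ge (nums : List Int) (v j : Int) (hj : -1 ≤ j) : -1 ≤ loLoop nums v j := by
  induction hn : (j + 1).toNat using Nat.strong_induction_on generalizing j with
  | _ n ih =>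
    by_cases h : 0 ≤ j ∧ PySem.List.pyGetD nums j 0 ≥ v
    · rw [loLoop_step h.1 h.2]
      exact ih (j - 1 + 1).toNat (by omega) (j - 1) (by omega) rfl
    · rw [loLoop_eq_self h]; omega

theorem loLoop_skipped (nums : List Int) (v j : Int) :
    ∀ m, loLoop nums v j < m → m ≤ j → PySem.List.pyGetD nums m 0 ≥ v := by
  induction hn : (j + 1).toNat using Nat.strong_induction_on generalizing j with
  | _ n ih =>
    intro m hm1 hm2
    by_cases h : 0 ≤ j ∧ PySem.List.pyGetD nums j 0 ≥ v
    · rcases eq_or_lt_of_le hm2 with rfl | hlt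
      · exact h.2
      · rw [loLoop_step h.1 h.2] at hm1
        exact ih (j - 1 + 1).toNat (by omega) (j - 1) rfl m hm1 (by omega)
    · rw [loLoop_eq_self h] at hm1; omega

theorem loLoop_absorb (nums : List Int) (v : Int) : ∀ j j' : Int, -1 ≤ j' → j' ≤ j →
    (∀ m, j' < m → m ≤ j → PySem.List.pyGetD nums m 0 ≥ v) →
    loLoop nums v j = loLoop nums v j' := by
  intro j
  induction hn : (j + 1).toNat using Nat.strong_induction_on generalizing j with
  | _ n ih =>
    intro j' hj' hle hall
    rcases eq_or_lt_of_le hle with rfl | hlt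
    · rfl
    · have h0 : (0:Int) ≤ j := by omega
      rw [loLoop_step h0 (hall j (by omega) le_rfl)]
      exact ih (j - 1 + 1).toNat (by omega) (j - 1) rfl j' hj' (by omega)
        (fun m hm1 hm2 => hall m hm1 (by omega))

theorem hiLoop_eq_self {nums : List Int} {v j : Int}
    (h : ¬ (j < (nums.length : Int) ∧ PySem.List.pyGetD nums j 0 ≥ v)) : hiLoop nums v j = j := by
  rw [hiLoop]; simp [h]

theorem hiLoop_step {nums : List Int} {v j : Int}
    (h0 : j < (nums.length : Int)) (h1 : PySem.List.pyGetD nums j 0 ≥ v) :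
    hiLoop nums v j = hiLoop nums v (j + 1) := by
  rw [hiLoop]; simp [h0, h1]

theorem hiLoop_ge (nums : List Int) (v j : Int) : j ≤ hiLoop nums v j := by
  induction hn : ((nums.length : Int) + 1 - j).toNat using Nat.strong_induction_on generalizing j with
  | _ n ih =>
    by_cases h : j < (nums.length : Int) ∧ PySem.List.pyGetD nums j 0 ≥ v
    · rw [hiLoop_step h.1 h.2]
      have := ih ((nums.length : Int) + 1 - (j + 1)).toNat (by omega) (j + 1) rfl
      omega
    · rw [hiLoop_eq_self h]

theorem hiLoop_le (nums : List Int) (v j : Int) (hj : j ≤ (nums.length : Int)) :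
    hiLoop nums v j ≤ (nums.length : Int) := by
  induction hn : ((nums.length : Int) + 1 - j).toNat using Nat.strong_induction_on generalizing j with
  | _ n ih =>
    by_cases h : j < (nums.length : Int) ∧ PySem.List.pyGetD nums j 0 ≥ v
    · rw [hiLoop_step h.1 h.2]
      exact ih ((nums.length : Int) + 1 - (j + 1)).toNat (by omega) (j + 1) (by omega) rfl
    · rw [hiLoop_eq_self h]; omega

theorem hiLoop_skipped (nums : List Int) (v j : Int) :
    ∀ m, j ≤ m → m < hiLoop nums v j → PySem.List.pyGetD nums m 0 ≥ v := by
  induction hn : ((nums.length : Int) + 1 - j).toNat using Nat.strong_induction_on generalizing j with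
  | _ n ih =>
    intro m hm1 hm2
    by_cases h : j < (nums.length : Int) ∧ PySem.List.pyGetD nums j 0 ≥ v
    · rcases eq_or_lt_of_le hm1 with rfl | hlt
      · exact h.2
      · rw [hiLoop_step h.1 h.2] at hm2
        exact ih ((nums.length : Int) + 1 - (j + 1)).toNat (by omega) (j + 1) rfl m (by omega) hm2
    · rw [hiLoop_eq_self h] at hm2; omega

theorem hiLoop_absorb (nums : List Int) (v : Int) : ∀ j j' : Int,
    j' ≤ (nums.length : Int) → j ≤ j' →
    (∀ m, j ≤ m → m < j' → PySem.List.pyGetD nums m 0 ≥ v) →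
    hiLoop nums v j = hiLoop nums v j' := by
  intro j
  induction hn : ((nums.length : Int) + 1 - j).toNat using Nat.strong_induction_on generalizing j with
  | _ n ih =>
    intro j' hj' hle hall
    rcases eq_or_lt_of_le hle with rfl | hlt
    · rfl
    · have h0 : j < (nums.length : Int) := by omega
      rw [hiLoop_step h0 (hall j le_rfl (by omega))]
      exact ih ((nums.length : Int) + 1 - (j + 1)).toNat (by omega) (j + 1) rfl j' hj' (by omega)
        (fun m hm1 hm2 => hall m (by omega) hm2)


-- ----- the stacks are chain-linked -----

theorem chainL_nil_marker {nums : List Int} {k : Int} (h : ChainL nums k []) : k = -1 := by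
  cases h; rfl

theorem chainL_cons_marker {nums : List Int} {k t : Int} {rest : List Int}
    (h : ChainL nums k (t :: rest)) : k = t := by
  cases h; rfl

theorem chainR_nil_marker {nums : List Int} {k : Int} (h : ChainR nums k []) : k = (nums.length : Int) := by
  cases h; rfl

theorem chainR_cons_marker {nums : List Int} {k t : Int} {rest : List Int}
    (h : ChainR nums k (t :: rest)) : k = t := by
  cases h; rfl

theorem pop_chainL {nums : List Int} {k : Int} {s : List Int}
    (h : ChainL nums k s) (v : Int) :
    ChainL nums (loLoop nums v k) (popWhileA nums v s) := by
  induction h with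
  | nil =>
      rw [loLoop_eq_self (fun hh => absurd hh.1 (by omega))]
      exact ChainL.nil
  | @cons t rest h0 h1 hc ih =>
      simp only [popWhileA]
      by_cases hg : PySem.List.pyGetD nums t 0 ≥ v
      · rw [if_pos hg, loLoop_step h0 hg,
          loLoop_absorb nums v (t - 1) (loLoop nums (PySem.List.pyGetD nums t 0) (t - 1))
            (loLoop_ge nums _ (t - 1) (by omega)) (loLoop_le nums _ (t - 1))
            (fun m hm1 hm2 => le_trans hg (loLoop_skipped nums _ (t - 1) m hm1 hm2))]
        exact ih
      · rw [if_neg hg, loLoop_eq_self (fun hh => hg hh.2)]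
        exact ChainL.cons h0 h1 hc

theorem pop_chainR {nums : List Int} {k : Int} {s : List Int}
    (h : ChainR nums k s) (v : Int) :
    ChainR nums (hiLoop nums v k) (popWhileA nums v s) := by
  induction h with
  | nil =>
      rw [hiLoop_eq_self (fun hh => absurd hh.1 (by omega))]
      exact ChainR.nil
  | @cons t rest h0 h1 hc ih =>
      simp only [popWhileA]
      by_cases hg : PySem.List.pyGetD nums t 0 ≥ v
      · rw [if_pos hg, hiLoop_step h1 hg,
          hiLoop_absorb nums v (t + 1) (hiLoop nums (PySem.List.pyGetD nums t 0) (t + 1))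
            (hiLoop_le nums _ (t + 1) (by omega)) (hiLoop_ge nums _ (t + 1))
            (fun m hm1 hm2 => le_trans hg (hiLoop_skipped nums _ (t + 1) m hm1 hm2))]
        exact ih
      · rw [if_neg hg, hiLoop_eq_self (fun hh => hg hh.2)]
        exact ChainR.cons h0 h1 hc

-- ----- array get/set plumbing -----

theorem pyGetD_pySetD_int (xs : List Int) (i j v d : Int)
    (hi0 : 0 ≤ i) (hj0 : 0 ≤ j) (hj : j < (xs.length : Int)) :
    PySem.List.pyGetD (PySem.List.pySetD xs i v) j d = if j = i then v else PySem.List.pyGetD xs j d := by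
  rw [PySem.List.pySetD_of_nonneg xs v hi0,
      PySem.List.pyGetD_eq_getElem _ d hj0 (by simpa using hj),
      List.getElem_set]
  by_cases hji : j = i
  · rw [if_pos (by omega), if_pos hji]
  · rw [if_neg (by omega), if_neg hji, PySem.List.pyGetD_eq_getElem xs d hj0 hj]

theorem pyGetD_replicate (m : Nat) (c j d : Int) (hj0 : 0 ≤ j) (hj : j < (m : Int)) :
    PySem.List.pyGetD (List.replicate m c) j d = c := by
  rw [PySem.List.pyGetD_eq_getElem _ d hj0 (by simpa using hj), List.getElem_replicate]

-- ----- loop invariants for A's two passes -----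

def InvL (nums : List Int) (i : Int) (st : List Int × List Int) : Prop :=
  ChainL nums (i - 1) st.1 ∧ st.2.length = nums.length + 1 ∧
  ∀ j : Int, 0 ≤ j → j ≤ (nums.length : Int) →
    PySem.List.pyGetD st.2 j 0 =
      if j < i then loLoop nums (PySem.List.pyGetD nums j 0) (j - 1) else -1

def InvR (nums : List Int) (i : Int) (st : List Int × List Int) : Prop :=
  ChainR nums i st.1 ∧ st.2.length = nums.length + 1 ∧
  ∀ j : Int, 0 ≤ j → j ≤ (nums.length : Int) →
    PySem.List.pyGetD st.2 j 0 =
      if i ≤ j ∧ j < (nums.length : Int) then hiLoop nums (PySem.List.pyGetD nums j 0) (j + 1)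
      else (nums.length : Int)

theorem stepLeftA_inv {nums : List Int} {i : Int} {st : List Int × List Int}
    (h : InvL nums i st) (h0 : 0 ≤ i) (h1 : i < (nums.length : Int)) :
    InvL nums (i + 1) (stepLeftA nums st i) := by
  obtain ⟨hch, hlen, hget⟩ := h
  have hpop := pop_chainL hch (PySem.List.pyGetD nums i 0)
  have hi' : i + 1 - 1 = i := by omega
  cases hs : popWhileA nums (PySem.List.pyGetD nums i 0) st.1 with
  | nil =>
      rw [hs] at hpop
      have hval : loLoop nums (PySem.List.pyGetD nums i 0) (i - 1) = -1 := chainL_nil_marker hpop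
      have hrw : stepLeftA nums st i = (i :: [], st.2) := by simp only [stepLeftA, hs]
      rw [hrw]
      refine ⟨by rw [hi']; exact ChainL.cons h0 h1 hpop, hlen, ?_⟩
      intro j hj0 hjn
      rw [hget j hj0 hjn]
      by_cases hji : j = i
      · subst hji; rw [if_neg (by omega), if_pos (by omega), hval]
      · by_cases hlt : j < i
        · rw [if_pos hlt, if_pos (by omega)]
        · rw [if_neg hlt, if_neg (by omega)]
  | cons t rest =>
      rw [hs] at hpop
      have hval : t = loLoop nums (PySem.List.pyGetD nums i 0) (i - 1) :=
        (chainL_cons_marker hpop).symm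
      have hrw : stepLeftA nums st i = (i :: t :: rest, PySem.List.pySetD st.2 i t) := by
        simp only [stepLeftA, hs]
      rw [hrw]
      refine ⟨by rw [hi']; exact ChainL.cons h0 h1 (hval ▸ hpop), ?_, ?_⟩
      · rw [PySem.List.pySetD_of_nonneg st.2 t h0, List.length_set, hlen]
      · intro j hj0 hjn
        rw [pyGetD_pySetD_int st.2 i j t 0 h0 hj0 (by omega)]
        by_cases hji : j = i
        · subst hji; rw [if_pos rfl, if_pos (by omega), ← hval]
        · rw [if_neg hji, hget j hj0 hjn]
          by_cases hlt : j < i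
          · rw [if_pos hlt, if_pos (by omega)]
          · rw [if_neg hlt, if_neg (by omega)]

theorem stepRightA_inv {nums : List Int} {i : Int} {st : List Int × List Int}
    (h : InvR nums (i + 1) st) (h0 : 0 ≤ i) (h1 : i < (nums.length : Int)) :
    InvR nums i (stepRightA nums st i) := by
  obtain ⟨hch, hlen, hget⟩ := h
  have hpop := pop_chainR hch (PySem.List.pyGetD nums i 0)
  cases hs : popWhileA nums (PySem.List.pyGetD nums i 0) st.1 with
  | nil =>
      rw [hs] at hpop
      have hval : hiLoop nums (PySem.List.pyGetD nums i 0) (i + 1) = (nums.length : Int) :=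
        chainR_nil_marker hpop
      have hrw : stepRightA nums st i = (i :: [], st.2) := by simp only [stepRightA, hs]
      rw [hrw]
      refine ⟨ChainR.cons h0 h1 hpop, hlen, ?_⟩
      intro j hj0 hjn
      rw [hget j hj0 hjn]
      by_cases hji : j = i
      · subst hji; rw [if_neg (by omega), if_pos (by omega), hval]
      · by_cases hle : i + 1 ≤ j ∧ j < (nums.length : Int)
        · rw [if_pos hle, if_pos (by omega)]
        · rw [if_neg hle, if_neg (by omega)]
  | cons t rest =>
      rw [hs] at hpop
      have hval : t = hiLoop nums (PySem.List.pyGetD nums i 0) (i + 1) :=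
        (chainR_cons_marker hpop).symm
      have hrw : stepRightA nums st i = (i :: t :: rest, PySem.List.pySetD st.2 i t) := by
        simp only [stepRightA, hs]
      rw [hrw]
      refine ⟨ChainR.cons h0 h1 (hval ▸ hpop), ?_, ?_⟩
      · rw [PySem.List.pySetD_of_nonneg st.2 t h0, List.length_set, hlen]
      · intro j hj0 hjn
        rw [pyGetD_pySetD_int st.2 i j t 0 h0 hj0 (by omega)]
        by_cases hji : j = i
        · subst hji; rw [if_pos rfl, if_pos (by omega), ← hval]
        · rw [if_neg hji, hget j hj0 hjn]
          by_cases hle : i + 1 ≤ j ∧ j < (nums.length : Int)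
          · rw [if_pos hle, if_pos (by omega)]
          · rw [if_neg hle, if_neg (by omega)]

theorem foldl_stepLeftA_inv (nums : List Int) :
    ∀ (i : Int) (st : List Int × List Int), 0 ≤ i → i ≤ (nums.length : Int) → InvL nums i st →
      InvL nums (nums.length : Int)
        ((PySem.List.pyRange i (nums.length : Int) 1).foldl (stepLeftA nums) st) := by
  intro i
  induction hn : ((nums.length : Int) - i).toNat using Nat.strong_induction_on generalizing i with
  | _ n ih =>
    intro st h0 h1 hinv
    rcases eq_or_lt_of_le h1 with rfl | hlt
    · rw [PySem.List.pyRange_one_eq_nil le_rfl]; exact hinv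
    · rw [PySem.List.pyRange_one_cons hlt, List.foldl_cons]
      exact ih ((nums.length : Int) - (i + 1)).toNat (by omega) (i + 1) rfl _ (by omega) (by omega)
        (stepLeftA_inv hinv h0 hlt)

theorem foldl_stepRightA_inv (nums : List Int) :
    ∀ (i : Int) (st : List Int × List Int), -1 ≤ i → i ≤ (nums.length : Int) - 1 →
      InvR nums (i + 1) st →
      InvR nums 0 ((PySem.List.pyRange i (-1) (-1)).foldl (stepRightA nums) st) := by
  intro i
  induction hn : (i + 1).toNat using Nat.strong_induction_on generalizing i with
  | _ n ih
  =>
    intro st h0 h1 hinv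
    rcases eq_or_lt_of_le h0 with rfl | hlt
    · rw [PySem.List.pyRange_neg_one_eq_nil le_rfl]
      simpa using hinv
    · rw [PySem.List.pyRange_neg_one_cons hlt, List.foldl_cons]
      have hstep := stepRightA_inv hinv (by omega) (by omega)
      exact ih (i - 1 + 1).toNat (by omega) (i - 1) rfl _ (by omega) (by omega)
        (by rw [show i - 1 + 1 = i by omega]; exact hstep)

-- ----- the two final scans agree -----

theorem scan_eq (nums left right : List Int) (threshold : Int)
    (hL : ∀ j : Int, 0 ≤ j → j < (nums.length : Int) →
      PySem.List.pyGetD left j 0 = loLoop nums (PySem.List.pyGetD nums j 0) (j - 1))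
    (hR : ∀ j : Int, 0 ≤ j → j < (nums.length : Int) →
      PySem.List.pyGetD right j 0 = hiLoop nums (PySem.List.pyGetD nums j 0) (j + 1)) :
    ∀ L : List Int, (∀ i ∈ L, 0 ≤ i ∧ i < (nums.length : Int)) →
      scanA nums left right threshold L = scanB nums threshold L := by
  intro L
  induction L with
  | nil => intro _; rfl
  | cons i rest ih =>
      intro hmem
      obtain ⟨hi0, hin⟩ := hmem i (List.mem_cons_self ..)
      simp only [scanA, scanB]
      rw [hL i hi0 hin, hR i hi0 hin]
      split
      · rfl
      · exact ih (fun m hm => hmem m (List.mem_cons_of_mem _ hm))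

-- ===== VERDICT (by name: the statement is the Claim_ definition above) =====
theorem validSubarraySize_spec : Claim_equal_validSubarraySize := by
  intro nums threshold _
  unfold Spec_validSubarraySize validSubarraySize validSubarraySize_alt
  set n : Int := (nums.length : Int) with hn
  have hn0 : 0 ≤ n := by positivity
  -- initial invariants
  have hrep : ((n : Int) + 1).toNat = nums.length + 1 := by omega
  have hinitL : InvL nums 0 ([], List.replicate (n + 1).toNat (-1 : Int)) := by
    refine ⟨(by norm_num : (0:Int) - 1 = -1) ▸ ChainL.nil, by rw [List.length_replicate, hrep], ?_⟩
    intro j hj0 hjn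
    rw [pyGetD_replicate _ _ _ _ hj0 (by omega), if_neg (by omega)]
  have hinitR : InvR nums ((n - 1) + 1) ([], List.replicate (n + 1).toNat n) := by
    have : n - 1 + 1 = n := by omega
    rw [this]
    refine ⟨ChainR.nil, by rw [List.length_replicate, hrep], ?_⟩
    intro j hj0 hjn
    rw [pyGetD_replicate _ _ _ _ hj0 (by omega), if_neg (by omega)]
  have hL := foldl_stepLeftA_inv nums 0 _ le_rfl hn0 hinitL
  have hR := foldl_stepRightA_inv nums (n - 1) _ (by omega) (by omega) hinitR
  exact scan_eq nums _ _ threshold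
    (fun j hj0 hjn => by rw [hL.2.2 j hj0 (by omega), if_pos hjn])
    (fun j hj0 hjn => by rw [hR.2.2 j hj0 (by omega), if_pos ⟨hj0, hjn⟩])
    _ (fun i hi => by rw [PySem.List.mem_pyRange_one] at hi; exact hi)
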